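-- pv_equiv track=rewrite | github.com/Nikita777-coder/AuraFlowMeditationGenerator | meditation_app.py | loop_audio_stream
-- ===== SOURCE A (Python) =====
-- def loop_audio_stream(samples_buffer, total_samples_needed):
--     if not samples_buffer:
--         return []
--     output = []
--     idx = 0
--     n = len(samples_buffer)
--     while len(output) < total_samples_needed:
--         output.append(samples_buffer[idx])
--         idx += 1
--         if idx >= n:
--             idx = 0
--     return output[:total_samples_needed]
-- ===== SOURCE B (Python) =====
-- def loop_audio_stream(samples_buffer, total_samples_needed):
--     if not samples_buffer:
--         return []
--     reps = -(-total_samples_needed // len(samples_buffer))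
--     return (list(samples_buffer) * reps)[:total_samples_needed]
-- ===== Notes on version B (the rewrite author's own statement) =====
-- stated objective: idiomatic
-- what changed: Replaces the per-element append loop with a wraparound index by a closed-form repetition count (ceiling division), block list replication and one slice.
import Mathlib
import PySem

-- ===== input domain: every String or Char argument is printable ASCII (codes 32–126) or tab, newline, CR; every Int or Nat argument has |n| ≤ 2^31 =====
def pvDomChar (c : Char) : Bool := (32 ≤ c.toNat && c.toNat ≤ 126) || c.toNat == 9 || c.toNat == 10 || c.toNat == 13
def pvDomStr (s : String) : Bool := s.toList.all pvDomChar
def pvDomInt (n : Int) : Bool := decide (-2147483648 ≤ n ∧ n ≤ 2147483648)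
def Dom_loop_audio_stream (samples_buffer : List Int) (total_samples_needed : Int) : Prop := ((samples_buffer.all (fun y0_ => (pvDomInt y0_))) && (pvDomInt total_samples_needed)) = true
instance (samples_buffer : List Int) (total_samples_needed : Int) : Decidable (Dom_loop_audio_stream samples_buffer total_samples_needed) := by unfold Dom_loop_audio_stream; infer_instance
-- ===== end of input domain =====

-- B replaces A's per-element wraparound-index append loop by a closed-form repetition count
-- (ceiling division), block replication of the buffer and one slice (objective: idiomatic).

-- ===== PORT A =====
-- the while loop; samples_buffer[idx] is always in range (0 ≤ idx < n is an invariant), so pyGetD is exact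
def loop_audio_stream_go (buf : List Int) (n : Int) (output : List Int) (idx : Int)
    (total : Int) : List Int :=
  if _h : (output.length : Int) < total then
    loop_audio_stream_go buf n (output ++ [PySem.List.pyGetD buf idx 0])
      (if idx + 1 ≥ n then 0 else idx + 1) total
  else output
termination_by (total - output.length).toNat
decreasing_by simp; omega

def loop_audio_stream (samples_buffer : List Int) (total_samples_needed : Int) : List Int :=
  if samples_buffer = [] then []
  else
    PySem.List.slice
      (loop_audio_stream_go samples_buffer samples_buffer.length [] 0 total_samples_needed)
      none (some total_samples_needed)

-- ===== PORT B =====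
def loop_audio_stream_alt (samples_buffer : List Int) (total_samples_needed : Int) : List Int :=
  if samples_buffer = [] then []
  else
    -- reps = -(-total // len); list(buf) * reps  (reps ≤ 0 gives []); then [:total]
    let reps : Int := -(PySem.Int.floordiv (-total_samples_needed) samples_buffer.length)
    PySem.List.slice (List.flatten (List.replicate reps.toNat samples_buffer))
      none (some total_samples_needed)

-- ===== PRECONDITION & SPEC =====
def Spec_loop_audio_stream (samples_buffer : List Int) (total_samples_needed : Int) (out : List Int) : Prop := out = loop_audio_stream_alt samples_buffer total_samples_needed
instance (samples_buffer : List Int) (total_samples_needed : Int) (out : List Int) : Decidable (Spec_loop_audio_stream samples_buffer total_samples_needed out) := by unfold Spec_loop_audio_stream; infer_instance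

-- ===== CLAIM (what is proved, stated in full; the proofs are below) =====
def Claim_equal_loop_audio_stream : Prop := ∀ (samples_buffer : List Int) (total_samples_needed : Int), Dom_loop_audio_stream samples_buffer total_samples_needed → Spec_loop_audio_stream samples_buffer total_samples_needed (loop_audio_stream samples_buffer total_samples_needed)

-- ===== LEMMAS AND PROOFS =====

-- abstract cyclic generator: take k elements from cur, restarting at full when cur runs out
def cycGen : Nat → List Int → List Int → List Int
  | 0, _, _ => []
  | _ + 1, [], _ => []
  | k + 1, x :: rest, full => x :: cycGen k (if rest = [] then full else rest) full

-- the while loop, started at a valid index, is cycGen on the corresponding suffix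
lemma go_eq_cycGen (buf : List Int) (total : Int) :
    ∀ (k : Nat) (output : List Int) (idx : Int), 0 ≤ idx → idx < buf.length →
      k = (total - output.length).toNat →
      loop_audio_stream_go buf buf.length output idx total
        = output ++ cycGen k (buf.drop idx.toNat) buf := by
  intro k
  induction k with
  | zero =>
    intro output idx _ _ hk
    rw [loop_audio_stream_go, dif_neg (by omega : ¬ ((output.length : Int) < total))]
    simp [cycGen]
  | succ k ih =>
    intro output idx h0 hlt hk
    have hidx : idx.toNat < buf.length := by omega
    rw [loop_audio_stream_go]
    rw [dif_pos (by omega)]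
    have hget : PySem.List.pyGetD buf idx 0 = buf[idx.toNat] :=
      PySem.List.pyGetD_eq_getElem buf 0 h0 hlt
    have hdrop : buf.drop idx.toNat = buf[idx.toNat] :: buf.drop (idx.toNat + 1) :=
      List.drop_eq_getElem_cons hidx
    by_cases hwrap : idx + 1 ≥ (buf.length : Int)
    · have hrest : buf.drop (idx.toNat + 1) = [] := by
        apply List.drop_eq_nil_of_le; omega
      rw [if_pos hwrap]
      rw [ih (output ++ [PySem.List.pyGetD buf idx 0]) 0 (by omega) (by omega) (by simp; omega)]
      rw [hget, hdrop, hrest]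
      simp [cycGen]
    · rw [if_neg hwrap]
      rw [ih (output ++ [PySem.List.pyGetD buf idx 0]) (idx + 1) (by omega) (by omega)
            (by simp; omega)]
      have : (idx + 1).toNat = idx.toNat + 1 := by omega
      rw [hget, hdrop, this]
      have hrest : buf.drop (idx.toNat + 1) ≠ [] := by
        intro h
        have := List.length_drop (l := buf) (i := idx.toNat + 1)
        rw [h] at this
        simp at this
        omega
      simp [cycGen, hrest]

lemma cycGen_of_le (full : List Int) :
    ∀ (cur : List Int) (k : Nat), k ≤ cur.length → cycGen k cur full = cur.take k := by
  intro cur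
  induction cur with
  | nil =>
    intro k hk
    have hk0 : k = 0 := by simpa using hk
    subst hk0; simp [cycGen]
  | cons x rest ih =>
    intro k hk
    cases k with
    | zero => simp [cycGen]
    | succ k =>
      simp at hk
      by_cases hr : rest = []
      · subst hr; simp at hk; subst hk; simp [cycGen]
      · simp [cycGen, hr, ih k hk]

lemma cycGen_of_ge (full : List Int) :
    ∀ (cur : List Int) (k : Nat), cur ≠ [] → cur.length ≤ k →
      cycGen k cur full = cur ++ cycGen (k - cur.length) full full := by
  intro cur
  induction cur with
  | nil => intro k h; exact absurd rfl h
  | cons x rest ih =>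
    intro k _ hk
    simp at hk
    obtain ⟨k, rfl⟩ : ∃ k', k = k' + 1 := ⟨k - 1, by omega⟩
    by_cases hr : rest = []
    · subst hr; simp [cycGen]
    · simp only [cycGen, if_neg hr]
      rw [ih k hr (by simp at hk ⊢; omega)]
      simp

lemma cycGen_eq_take_flatten (buf : List Int) (hbuf : buf ≠ []) :
    ∀ (r k : Nat), k ≤ r * buf.length →
      cycGen k buf buf = (List.flatten (List.replicate r buf)).take k := by
  intro r
  induction r with
  | zero => intro k hk; simp at hk; subst hk; simp [cycGen]
  | succ r ih =>
    intro k hk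
    have hflat : List.flatten (List.replicate (r + 1) buf)
        = buf ++ List.flatten (List.replicate r buf) := by
      simp [List.replicate_succ]
    rw [hflat, List.take_append]
    by_cases hle : k ≤ buf.length
    · rw [cycGen_of_le buf buf k hle]
      have : k - buf.length = 0 := by omega
      rw [this]; simp
    · rw [cycGen_of_ge buf buf k hbuf (by omega)]
      rw [ih (k - buf.length) (by
        have hn : 0 < buf.length := List.length_pos_iff.mpr hbuf
        have : (r + 1) * buf.length = r * buf.length + buf.length := by ring
        omega)]
      rw [show List.take k buf = buf from List.take_of_length_le (by omega)]

-- ===== VERDICT (by name: the statement is the Claim_ definition above) =====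
theorem loop_audio_stream_spec : Claim_equal_loop_audio_stream := by
  unfold Claim_equal_loop_audio_stream Spec_loop_audio_stream
  intro buf t _
  unfold loop_audio_stream loop_audio_stream_alt
  by_cases hbuf : buf = []
  · simp [hbuf]
  · rw [if_neg hbuf, if_neg hbuf]
    have hn : 0 < (buf.length : Int) := by
      have := List.length_pos_iff.mpr hbuf; omega
    set reps : Int := -(PySem.Int.floordiv (-t) buf.length) with hreps
    have hbr : (reps - 1) * buf.length < t ∧ t ≤ reps * buf.length :=
      (PySem.Int.neg_floordiv_neg_eq_iff_of_pos hn).mp hreps.symm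
    rw [go_eq_cycGen buf t t.toNat [] 0 le_rfl hn (by simp)]
    simp only [List.drop_zero, List.nil_append, Int.toNat_zero]
    by_cases ht : 0 < t
    · have hrep0 : 0 < reps := by nlinarith
      have hkle : t.toNat ≤ reps.toNat * buf.length := by
        have : ((reps.toNat * buf.length : Nat) : Int) = reps * buf.length := by
          push_cast [Int.toNat_of_nonneg hrep0.le]; ring
        omega
      rw [cycGen_eq_take_flatten buf hbuf reps.toNat t.toNat hkle]
      have htc : t = ((t.toNat : Nat) : Int) := by omega
      rw [htc, PySem.List.slice_to_natCast, PySem.List.slice_to_natCast, List.take_take]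
      simp
    · have h0 : t.toNat = 0 := by omega
      have hrep : reps ≤ 0 := by nlinarith
      have : reps.toNat = 0 := by omega
      rw [h0, this]
      simp [cycGen, PySem.List.slice]
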